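-- pv_equiv track=rewrite | github.com/Velmuruganvarahdaraj/Python_practice | Count repeated Character in String.py | count_repeated_characters
-- ===== SOURCE A (Python) =====
-- def count_repeated_characters(comp_string):
--     if not comp_string:
--         return 0
--     char_frequency = {}
--     for char in comp_string:
--         char_frequency[char] = char_frequency.get(char, 0) + 1
--     count = 0
--     for char, frequency in char_frequency.items():
--         if frequency == 1:
--             count += 1
--     return count
-- ===== SOURCE B (Python) =====
-- def count_repeated_characters(comp_string):
--     chars = list(comp_string)
--     count = 0
--     while chars:
--         c = chars[0]
--         if chars.count(c) == 1:
--             count += 1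
--         chars = [x for x in chars if x != c]
--     return count
-- ===== Notes on version B (the rewrite author's own statement) =====
-- stated objective: alternative
-- what changed: Replaces A's hash-table frequency pass plus items scan with a distinct-character elimination loop: repeatedly check the first remaining character's count and filter out all its occurrences, so no dictionary is built; it also drops A's empty-string special case.
import Mathlib
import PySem

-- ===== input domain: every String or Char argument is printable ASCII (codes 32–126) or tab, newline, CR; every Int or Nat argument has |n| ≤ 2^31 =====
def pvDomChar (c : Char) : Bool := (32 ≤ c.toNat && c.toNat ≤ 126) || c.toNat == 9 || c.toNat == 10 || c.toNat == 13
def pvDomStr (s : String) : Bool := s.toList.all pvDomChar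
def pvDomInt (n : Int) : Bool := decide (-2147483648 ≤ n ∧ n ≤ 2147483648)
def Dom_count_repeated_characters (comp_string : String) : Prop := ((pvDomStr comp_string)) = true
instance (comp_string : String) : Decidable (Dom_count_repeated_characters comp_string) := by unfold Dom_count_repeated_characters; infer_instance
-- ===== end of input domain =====

-- B replaces A's frequency dictionary (build + items scan) by distinct-character elimination:
-- repeatedly test the first remaining character's count and filter out all its occurrences
-- (objective: alternative — no hash table; one pass per distinct character).

-- ===== PORT A =====
def count_repeated_characters (comp_string : String) : Int :=
  if comp_string.toList = [] then 0
  else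
    let char_frequency := comp_string.toList.foldl
      (fun d ch => d.insert ch (d.getD ch 0 + 1)) (PySem.Dict.empty : PySem.Dict Char Int)
    char_frequency.items.foldl (fun count p => if p.2 == 1 then count + 1 else count) 0

-- ===== PORT B =====
-- the 'while chars:' loop of Source B: c = chars[0]; test chars.count(c) == 1; drop all c's
def crcGo : List Char → Int → Int
  | [], count => count
  | c :: rest, count =>
    let count' := if PySem.List.count (c :: rest) c == 1 then count + 1 else count
    crcGo ((c :: rest).filter (fun x => x != c)) count'
  termination_by chars _ => chars.length
  decreasing_by
    simp only [List.filter_cons]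
    simp only [bne_self_eq_false]
    exact Nat.lt_succ_of_le (List.length_filter_le _ _)

def count_repeated_characters_alt (comp_string : String) : Int :=
  crcGo comp_string.toList 0

-- ===== PRECONDITION & SPEC =====
def Spec_count_repeated_characters (comp_string : String) (out : Int) : Prop := out = count_repeated_characters_alt comp_string
instance (comp_string : String) (out : Int) : Decidable (Spec_count_repeated_characters comp_string out) := by unfold Spec_count_repeated_characters; infer_instance

-- ===== CLAIM (what is proved, stated in full; the proofs are below) =====
def Claim_equal_count_repeated_characters : Prop := ∀ (comp_string : String), Dom_count_repeated_characters comp_string → Spec_count_repeated_characters comp_string (count_repeated_characters comp_string)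

-- ===== LEMMAS AND PROOFS =====

-- B's elimination loop counts, over the distinct characters, those whose count in the list is 1.
lemma crcGo_eq (chars : List Char) (count : Int) :
    crcGo chars count = count + ((PySem.List.dedup chars).countP (fun k => chars.count k == 1) : Int) := by
  induction chars, count using crcGo.induct with
  | case1 count => simp [crcGo]
  | case2 c rest count cnt' ih =>
      rw [crcGo]
      have hfil : (c :: rest).filter (fun x => x != c) = rest.filter (fun x => x != c) := by
        simp
      set l' := rest.filter (fun x => x != c) with hl'
      simp only [cnt', dite_eq_ite] at ih
      rw [hfil] at ih
      rw [hfil, ih]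
      have hcnot : c ∉ PySem.List.dedup l' := by
        intro h
        rw [PySem.List.mem_dedup] at h
        simp [hl', List.mem_filter] at h
      have hnd : (c :: PySem.List.dedup l').Nodup :=
        List.nodup_cons.mpr ⟨hcnot, PySem.List.nodup_dedup _⟩
      have hperm : (PySem.List.dedup (c :: rest)).Perm (c :: PySem.List.dedup l') := by
        rw [List.perm_ext_iff_of_nodup (PySem.List.nodup_dedup _) hnd]
        intro a
        by_cases hac : a = c <;>
          simp [hl', List.mem_filter, hac]
      rw [hperm.countP_eq]
      rw [List.countP_cons]
      have hcong : (PySem.List.dedup l').countP (fun k => l'.count k == 1)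
          = (PySem.List.dedup l').countP (fun k => (c :: rest).count k == 1) := by
        apply List.countP_congr
        intro k hk
        rw [PySem.List.mem_dedup] at hk
        have hkc : k ≠ c := by
          simp [hl', List.mem_filter] at hk; exact hk.2
        have : l'.count k = (c :: rest).count k := by
          rw [hl', List.count_filter (by simp [hkc]), List.count_cons_of_ne (Ne.symm hkc)]
        rw [this]
      rw [hcong]
      by_cases hp : (c :: rest).count c = 1
      · simp [hp, PySem.List.count_eq]
        ring
      · have h0 : ¬ rest.count c = 0 := by
          simp at hp
          omega
        simp [h0, PySem.List.count_eq]

-- ===== VERDICT (by name: the statement is the Claim_ definition above) =====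
theorem count_repeated_characters_spec : Claim_equal_count_repeated_characters := by
  intro s _
  unfold Spec_count_repeated_characters count_repeated_characters count_repeated_characters_alt
  by_cases h : s.toList = []
  · simp [h, crcGo]
  · simp only [h, if_false]
    rw [PySem.Dict.foldl_insert_getD_add_one_eq_counter, PySem.Dict.items_counter,
        PySem.List.foldl_if_add_one, crcGo_eq]
    rw [List.countP_map, ← PySem.List.dedup_eq_ofList]
    have h1 : ((PySem.List.dedup s.toList).countP
        ((fun p : Char × Int => p.2 == 1) ∘ fun k => (k, (s.toList.count k : Int))))
        = (PySem.List.dedup s.toList).countP (fun k => s.toList.count k == 1) := by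
      apply List.countP_congr
      intro c _
      simp [Function.comp]
    rw [h1]
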